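-- pv_equiv track=rewrite | github.com/MattiaBarbiere/PINNs_for_harmonic_maps | hmpinn/benchmark_solver/solver.py | multi_indices
-- ===== SOURCE A (Python) =====
-- def multi_indices(dx: int):
--   """
--   dx = 0: ((0, 0),)
--   dx = 1: ((1, 0), (0, 1))
--   dx = 2: ((2, 0), (1, 1), (1, 1), (0, 2))
--   ...
--   """
--   assert dx >= 0
--
--   if dx == 0:
--     yield (0, 0)
--     return
--
--   for mindex in multi_indices(dx-1):
--     for j in range(2):
--       yield mindex[:j] + (mindex[j] + 1,) + mindex[j+1:]
-- ===== SOURCE B (Python) =====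
-- def multi_indices(dx: int):
--     assert dx >= 0
--     for p in range(2 ** dx):
--         c = bin(p).count('1')
--         yield (dx - c, c)
-- ===== Notes on version B (the rewrite author's own statement) =====
-- stated objective: simpler
-- what changed: Replaced the recursive generator that expands each level-(dx-1) tuple into two children by a flat loop over p in range(2**dx) emitting (dx - popcount(p), popcount(p)); the p-th element of A's sequence is exactly that pair.
import Mathlib
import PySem

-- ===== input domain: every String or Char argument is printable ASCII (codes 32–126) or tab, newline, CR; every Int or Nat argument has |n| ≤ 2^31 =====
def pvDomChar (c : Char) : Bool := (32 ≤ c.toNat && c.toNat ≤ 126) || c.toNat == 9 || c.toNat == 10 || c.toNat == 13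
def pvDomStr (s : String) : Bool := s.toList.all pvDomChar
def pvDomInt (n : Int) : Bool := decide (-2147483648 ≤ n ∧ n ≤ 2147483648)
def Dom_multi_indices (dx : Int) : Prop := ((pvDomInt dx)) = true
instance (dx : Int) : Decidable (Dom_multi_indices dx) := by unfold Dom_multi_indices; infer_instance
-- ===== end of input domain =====

-- B replaces A's recursive tuple expansion by one flat loop emitting (dx - popcount p, popcount p); objective: simpler.
-- ===== PORT A =====
-- recursion of A on the (nonnegative) depth; the Int wrapper handles the assert via Pre_
def multi_indices_rec : Nat → List (Int × Int)
  | 0 => [(0, 0)]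
  | n + 1 => (multi_indices_rec n).flatMap (fun m => [(m.1 + 1, m.2), (m.1, m.2 + 1)])

def multi_indices (dx : Int) : List (Int × Int) :=
  if dx < 0 then [] else multi_indices_rec dx.toNat

-- ===== PORT B =====
-- bin(p).count('1'), i.e. the popcount of p
def pvPopcnt (n : Nat) : Nat :=
  if h : n = 0 then 0 else pvPopcnt (n / 2) + n % 2
decreasing_by exact Nat.div_lt_self (Nat.pos_of_ne_zero h) one_lt_two

def multi_indices_alt (dx : Int) : List (Int × Int) :=
  if dx < 0 then [] else
    (List.range (2 ^ dx.toNat)).map (fun p => (dx - (pvPopcnt p : Int), (pvPopcnt p : Int)))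

-- ===== PRECONDITION & SPEC =====
-- Pre_ excludes dx < 0, on which both Pythons raise AssertionError.
def Pre_multi_indices (dx : Int) : Prop := 0 ≤ dx
instance (dx : Int) : Decidable (Pre_multi_indices dx) := by unfold Pre_multi_indices; infer_instance
def pvWitness_multi_indices : Int := (2)
def Spec_multi_indices (dx : Int) (out : List (Int × Int)) : Prop := out = multi_indices_alt dx
instance (dx : Int) (out : List (Int × Int)) : Decidable (Spec_multi_indices dx out) := by unfold Spec_multi_indices; infer_instance

-- ===== CLAIM (what is proved, stated in full; the proofs are below) =====
def Claim_equal_multi_indices : Prop := ∀ (dx : Int), Dom_multi_indices dx → Pre_multi_indices dx → Spec_multi_indices dx (multi_indices dx)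

-- ===== LEMMAS AND PROOFS =====
theorem pvPopcnt_zero : pvPopcnt 0 = 0 := by simp [pvPopcnt]

theorem pvPopcnt_two_mul (p : Nat) : pvPopcnt (2 * p) = pvPopcnt p := by
  rcases Nat.eq_zero_or_pos p with h | h
  · simp [h]
  · rw [pvPopcnt]
    simp [Nat.mul_mod_right, Nat.ne_of_gt (by omega : 0 < 2 * p)]

theorem pvPopcnt_two_mul_add_one (p : Nat) : pvPopcnt (2 * p + 1) = pvPopcnt p + 1 := by
  rw [pvPopcnt]
  simp [Nat.mul_add_div]

theorem range_two_mul_map {α : Type} (k : Nat) (g : Nat → α) :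
    (List.range (2 * k)).map g = (List.range k).flatMap (fun p => [g (2 * p), g (2 * p + 1)]) := by
  induction k with
  | zero => simp
  | succ k ih =>
    have : 2 * (k + 1) = (2 * k + 1) + 1 := by omega
    rw [this, List.range_succ, List.range_succ, List.range_succ]
    simp [ih]

theorem rec_eq_alt (n : Nat) :
    multi_indices_rec n
      = (List.range (2 ^ n)).map (fun p => ((n : Int) - (pvPopcnt p : Int), (pvPopcnt p : Int))) := by
  induction n with
  | zero => simp [multi_indices_rec, pvPopcnt_zero]
  | succ n ih =>
    rw [multi_indices_rec, ih, pow_succ, mul_comm, range_two_mul_map, List.flatMap_map]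
    apply List.flatMap_congr
    intro p _
    simp only [pvPopcnt_two_mul, pvPopcnt_two_mul_add_one]
    push_cast
    ring_nf

-- ===== VERDICT (by name: the statement is the Claim_ definition above) =====
theorem multi_indices_spec : Claim_equal_multi_indices := by
  intro dx _ hpre
  unfold Pre_multi_indices at hpre
  unfold Spec_multi_indices multi_indices multi_indices_alt
  rw [if_neg (by omega), if_neg (by omega), rec_eq_alt, Int.toNat_of_nonneg hpre]
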